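-- pv_equiv track=rewrite | github.com/NiniAndy/Hpyformer | funasr/models/hypformer/search.py | _find_differences_in_tuples
-- ===== SOURCE A (Python) =====
-- def _find_differences_in_tuples(tuples_list):
--     differences = {}
--
--     # 获取每个元组的长度，假设所有元组长度相同
--     length = len(tuples_list[0])
--
--     # 遍历每个位置
--     for i in range(length):
--         # 获取该位置所有元组的值
--         values_at_position = [tpl[i] for tpl in tuples_list]
--
--         # 如果该位置有不同的值，记录这些差异
--         if len(set(values_at_position)) > 1:
--             # 用于存储这个位置出现的不同值和对应的元组 ID
--             differences[i] = [{val: idx} for idx, val in enumerate(values_at_position)]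
--
--     for key, value_list in differences.items():
--         seen_keys = set()  # 用于跟踪已经遇到的键
--         filtered_list = []  # 用于存储过滤后的列表
--
--         for item in value_list:
--             # item 是一个字典，格式 {某个数值: 元组ID}
--             for k, v in item.items():
--                 if k not in seen_keys:
--                     seen_keys.add(k)  # 将键添加到已见过的集合中
--                     filtered_list.append(item)  # 保留第一次出现的项
--                     break  # 跳出当前循环，检查下一个 item
--
--         # 用过滤后的列表替换原来的列表
--         differences[key] = filtered_list
--
--     return differences
-- ===== SOURCE B (Python) =====
-- def _find_differences_in_tuples(tuples_list):
--     differences = {}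
--     for i in range(len(tuples_list[0])):
--         seen = set()
--         filtered = []
--         for idx, tpl in enumerate(tuples_list):
--             val = tpl[i]
--             if val not in seen:
--                 seen.add(val)
--                 filtered.append({val: idx})
--         if len(seen) > 1:
--             differences[i] = filtered
--     return differences
-- ===== Notes on version B (the rewrite author's own statement) =====
-- stated objective: simpler
-- what changed: Single pass per position: the first-occurrence filtering (seen set) is done while collecting values, so A's intermediate full value-lists, its second dict-rewriting phase and the nested break-loop disappear.
import Mathlib
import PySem

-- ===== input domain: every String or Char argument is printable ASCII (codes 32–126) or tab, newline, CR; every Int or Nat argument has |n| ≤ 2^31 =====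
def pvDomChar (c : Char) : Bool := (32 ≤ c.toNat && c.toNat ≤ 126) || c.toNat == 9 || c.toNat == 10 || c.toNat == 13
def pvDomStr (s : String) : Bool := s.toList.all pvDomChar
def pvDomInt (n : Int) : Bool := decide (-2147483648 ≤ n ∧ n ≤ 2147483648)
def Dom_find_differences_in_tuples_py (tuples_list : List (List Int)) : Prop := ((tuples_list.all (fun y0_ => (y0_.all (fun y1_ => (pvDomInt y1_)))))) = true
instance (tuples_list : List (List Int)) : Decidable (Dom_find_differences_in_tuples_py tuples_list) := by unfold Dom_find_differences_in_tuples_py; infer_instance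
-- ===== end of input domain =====

-- B folds A's separate first-occurrence filtering pass into the per-position collection loop
-- (one pass per position, no intermediate full value-lists, no dict-rewriting phase): simpler decomposition, same results.

-- ===== PORT A =====
-- A's inner 'for k, v in item.items(): if k not in seen: …; break' loop (break = stop recursing)
def pvA_itemLoop (entries : List (Int × Int)) (item : List (Int × Int))
    (seen : PySem.Set Int) (filtered : List (List (Int × Int))) :
    PySem.Set Int × List (List (Int × Int)) :=
  match entries with
  | [] => (seen, filtered)
  | (k, _v) :: rest =>
    if seen.contains k then pvA_itemLoop rest item seen filtered
    else (seen.add k, filtered ++ [item])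

def find_differences_in_tuples_py (tuples_list : List (List Int)) : List (Int × List (List (Int × Int))) :=
  let differences : PySem.Dict Int (List (List (Int × Int))) := PySem.Dict.empty
  let length : Int := ((PySem.List.pyGetD tuples_list 0 []).length : Nat)
  let differences := (PySem.List.pyRange 0 length).foldl (fun d i =>
    let values_at_position := tuples_list.map (fun tpl => PySem.List.pyGetD tpl i 0)
    if (PySem.Set.ofList values_at_position).length > 1 then
      d.insert i ((PySem.List.enumerate values_at_position).map (fun p => [(p.2, p.1)]))
    else d) differences
  let differences := differences.items.foldl (fun d kv =>
    let sf := kv.2.foldl (fun acc item => pvA_itemLoop item item acc.1 acc.2)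
      ((PySem.Set.empty : PySem.Set Int), ([] : List (List (Int × Int))))
    d.insert kv.1 sf.2) differences
  differences.items

-- ===== PORT B =====
def find_differences_in_tuples_py_alt (tuples_list : List (List Int)) : List (Int × List (List (Int × Int))) :=
  let length : Int := ((PySem.List.pyGetD tuples_list 0 []).length : Nat)
  ((PySem.List.pyRange 0 length).foldl (fun d i =>
    let sf := (PySem.List.enumerate tuples_list).foldl (fun acc p =>
      let val := PySem.List.pyGetD p.2 i 0
      if acc.1.contains val then acc
      else (acc.1.add val, acc.2 ++ [[(val, p.1)]]))
      ((PySem.Set.empty : PySem.Set Int), ([] : List (List (Int × Int))))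
    if sf.1.length > 1 then d.insert i sf.2 else d)
    (PySem.Dict.empty : PySem.Dict Int (List (List (Int × Int))))).items

-- ===== PRECONDITION & SPEC =====
-- Pre_ excludes exactly the inputs on which Python A raises IndexError: the empty list
-- (tuples_list[0]) and ragged inputs where some tuple is shorter than the first one (tpl[i]).
def Pre_find_differences_in_tuples_py (tuples_list : List (List Int)) : Prop :=
  tuples_list ≠ [] ∧ ∀ t ∈ tuples_list, (tuples_list.headD []).length ≤ t.length
instance (tuples_list : List (List Int)) : Decidable (Pre_find_differences_in_tuples_py tuples_list) := by
  unfold Pre_find_differences_in_tuples_py; infer_instance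
def pvWitness_find_differences_in_tuples_py : List (List Int) := [[1, 2], [1, 3]]

def Spec_find_differences_in_tuples_py (tuples_list : List (List Int)) (out : List (Int × List (List (Int × Int)))) : Prop := out = find_differences_in_tuples_py_alt tuples_list
instance (tuples_list : List (List Int)) (out : List (Int × List (List (Int × Int)))) : Decidable (Spec_find_differences_in_tuples_py tuples_list out) := by unfold Spec_find_differences_in_tuples_py; infer_instance

-- ===== CLAIM (what is proved, stated in full; the proofs are below) =====
def Claim_equal_find_differences_in_tuples_py : Prop := ∀ (tuples_list : List (List Int)), Dom_find_differences_in_tuples_py tuples_list → Pre_find_differences_in_tuples_py tuples_list → Spec_find_differences_in_tuples_py tuples_list (find_differences_in_tuples_py tuples_list)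

-- ===== LEMMAS AND PROOFS =====

-- enumerate commutes with map on the element component
theorem pvEnumMap {α β : Type} (f : α → β) (xs : List α) (s : Int) :
    PySem.List.enumerate (xs.map f) s = (PySem.List.enumerate xs s).map (fun p => (p.1, f p.2)) := by
  induction xs generalizing s <;> simp_all [PySem.List.enumerate]

-- the seen-set accumulated by B's inner loop is exactly set(values_at_position)
theorem pvInnerFst {α : Type} (f : α → Int) (xs : List α) :
    ∀ (s : Int) (seen : PySem.Set Int) (fl : List (List (Int × Int))),
    ((PySem.List.enumerate xs s).foldl (fun acc p =>
        if acc.1.contains (f p.2) then acc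
        else (acc.1.add (f p.2), acc.2 ++ [[(f p.2, p.1)]]))
      (seen, fl)).1 = (xs.map f).foldl PySem.Set.add seen := by
  induction xs with
  | nil => intro s seen fl; simp [PySem.List.enumerate]
  | cons v t ih =>
    intro s seen fl
    simp only [PySem.List.enumerate, List.foldl_cons, List.map_cons]
    cases h : seen.contains (f v) with
    | true =>
      rw [if_pos rfl, ih,
          show PySem.Set.add seen (f v) = seen by unfold PySem.Set.add; rw [if_pos h]]
    | false => rw [if_neg (by simp), ih]

-- A's filtering fold over the singleton dicts equals B's inline fold
theorem pvInnerEq (tl : List (List Int)) (i : Int) :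
    (((PySem.List.enumerate (tl.map (fun tpl => PySem.List.pyGetD tpl i 0))).map
        (fun p => [(p.2, p.1)])).foldl (fun acc item => pvA_itemLoop item item acc.1 acc.2)
      ((PySem.Set.empty : PySem.Set Int), ([] : List (List (Int × Int)))))
    = (PySem.List.enumerate tl).foldl (fun acc p =>
        if acc.1.contains (PySem.List.pyGetD p.2 i 0) then acc
        else (acc.1.add (PySem.List.pyGetD p.2 i 0), acc.2 ++ [[(PySem.List.pyGetD p.2 i 0, p.1)]]))
      ((PySem.Set.empty : PySem.Set Int), ([] : List (List (Int × Int)))) := by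
  rw [List.foldl_map, pvEnumMap, List.foldl_map]
  congr 1

theorem pvContainsInsert {V : Type} (d : PySem.Dict Int V) (i j : Int) (v : V)
    (hji : j ≠ i) (h : d.contains j = false) : (d.insert i v).contains j = false := by
  simp only [PySem.Dict.insert, PySem.Dict.contains, List.any_eq_false, beq_iff_eq] at h ⊢
  split
  · intro p hp
    simp only [List.mem_map] at hp
    obtain ⟨q, hq, rfl⟩ := hp
    split
    · exact fun hh => hji hh.symm
    · exact h q hq
  · intro p hp
    rcases List.mem_append.mp hp with hq | hq
    · exact h p hq
    · simp only [List.mem_singleton] at hq; subst hq; exact fun hh => hji hh.symm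

theorem pvInsertFresh {V : Type} (d : PySem.Dict Int V) (i : Int) (v : V)
    (h : d.contains i = false) : (d.insert i v).items = d.items ++ [(i, v)] := by
  simp [PySem.Dict.insert, h]

theorem pvInsertMem {V : Type} (pre rest : List (Int × V)) (k : Int) (v w : V)
    (hpre : ∀ q ∈ pre, (q.1 = k) → False) (hrest : ∀ q ∈ rest, (q.1 = k) → False) :
    ((PySem.Dict.mk (pre ++ (k, w) :: rest)).insert k v).items = pre ++ (k, v) :: rest := by
  have hc : (PySem.Dict.mk (pre ++ (k, w) :: rest)).contains k = true := by
    simp [PySem.Dict.contains]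
  simp only [PySem.Dict.insert, hc, if_pos, List.map_append, List.map_cons]
  rw [List.map_congr_left (l := pre) (g := id) (fun q hq => by
        simp [show (q.1 == k) = false from beq_eq_false_iff_ne.mpr (fun hh => hpre q hq hh)]),
      List.map_congr_left (l := rest) (g := id) (fun q hq => by
        simp [show (q.1 == k) = false from beq_eq_false_iff_ne.mpr (fun hh => hrest q hq hh)])]
  simp

theorem pvDictBuild {V : Type} (P : Int → Prop) [DecidablePred P] (val : Int → V) :
    ∀ (is_ : List Int) (d : PySem.Dict Int V), is_.Nodup → (∀ i ∈ is_, d.contains i = false) →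
    (is_.foldl (fun d i => if P i then d.insert i (val i) else d) d).items
      = d.items ++ (is_.filter (fun i => decide (P i))).map (fun i => (i, val i)) := by
  intro is_
  induction is_ with
  | nil => intro d _ _; simp
  | cons i rest ih =>
    intro d hnd hfresh
    simp only [List.foldl_cons, List.filter_cons]
    by_cases hP : P i
    · have hfresh' : ∀ j ∈ rest, (d.insert i (val i)).contains j = false := fun j hj =>
        pvContainsInsert d i j (val i) (fun h => (List.nodup_cons.mp hnd).1 (h ▸ hj))
          (hfresh j (List.mem_cons_of_mem _ hj))
      rw [if_pos hP, ih _ (List.nodup_cons.mp hnd).2 hfresh',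
          pvInsertFresh d i (val i) (hfresh i List.mem_cons_self)]
      simp [hP]
    · rw [if_neg hP, ih _ (List.nodup_cons.mp hnd).2
        (fun j hj => hfresh j (List.mem_cons_of_mem _ hj))]
      simp [hP]

theorem pvDictRewrite {V : Type} (g : Int × V → V) :
    ∀ (rest pre : List (Int × V)),
    ((pre ++ rest).map Prod.fst).Nodup →
    (rest.foldl (fun d kv => d.insert kv.1 (g kv)) (PySem.Dict.mk (pre ++ rest))).items
      = pre ++ rest.map (fun kv => (kv.1, g kv)) := by
  intro rest
  induction rest with
  | nil => intro pre _; simp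
  | cons kv rest' ih =>
    intro pre hnd
    obtain ⟨k, w⟩ := kv
    have hnd2 : (pre.map Prod.fst ++ k :: rest'.map Prod.fst).Nodup := by simpa using hnd
    have hpre : ∀ q ∈ pre, q.1 = k → False := by
      intro q hq hq1
      exact (List.disjoint_of_nodup_append hnd2) (List.mem_map_of_mem hq) (by simp [hq1])
    have hrest : ∀ q ∈ rest', q.1 = k → False := by
      intro q hq hq1
      have := (List.nodup_append.mp hnd2).2.1
      exact (List.nodup_cons.mp this).1 (by simpa [hq1] using List.mem_map_of_mem (f := Prod.fst) hq)
    rw [List.foldl_cons]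
    have hd : ((PySem.Dict.mk (pre ++ (k, w) :: rest')).insert (k, w).1 (g (k, w)))
        = PySem.Dict.mk ((pre ++ [(k, g (k, w))]) ++ rest') := by
      cases h : ((PySem.Dict.mk (pre ++ (k, w) :: rest')).insert (k, w).1 (g (k, w))) with
      | mk it =>
        have := pvInsertMem pre rest' k (g (k, w)) w hpre hrest
        rw [h] at this
        simp only [PySem.Dict.mk.injEq]
        simpa using this
    rw [hd, ih]
    · simp
    · simpa using hnd2


-- rewriting every value of a dict iterating over its own items (pre = [] case)
theorem pvPhase2 {V : Type} (g : Int × V → V) (d : PySem.Dict Int V)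
    (hnd : (d.items.map Prod.fst).Nodup) :
    (d.items.foldl (fun d' kv => d'.insert kv.1 (g kv)) d).items
      = d.items.map (fun kv => (kv.1, g kv)) := by
  have h := pvDictRewrite g d.items [] (by simpa using hnd)
  simp only [List.nil_append] at h
  exact h

-- the two loops test the same condition: len(set(values)) > 1 vs len(seen) > 1
theorem pvCondEq (tl : List (List Int)) (i : Int) :
    ((PySem.Set.ofList (tl.map (fun tpl => PySem.List.pyGetD tpl i 0))).length > 1) ↔
    (((PySem.List.enumerate tl).foldl (fun acc p =>
        if acc.1.contains (PySem.List.pyGetD p.2 i 0) then acc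
        else (acc.1.add (PySem.List.pyGetD p.2 i 0), acc.2 ++ [[(PySem.List.pyGetD p.2 i 0, p.1)]]))
      ((PySem.Set.empty : PySem.Set Int), ([] : List (List (Int × Int))))).1.length > 1) := by
  rw [pvInnerFst (fun tpl => PySem.List.pyGetD tpl i 0) tl 0 PySem.Set.empty []]
  exact Iff.rfl

-- the two phase-structures produce the same items, given pointwise-equal conditions and values
theorem pvMain {V : Type} (P : Int → Prop) [DecidablePred P] (val : Int → V) (g : Int × V → V)
    (P' : Int → Prop) [DecidablePred P'] (val' : Int → V)
    (is_ : List Int) (hnd : is_.Nodup)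
    (hP : ∀ i, P i ↔ P' i) (hval : ∀ i, g (i, val i) = val' i) :
    ((is_.foldl (fun d i => if P i then d.insert i (val i) else d) PySem.Dict.empty).items.foldl
        (fun d kv => d.insert kv.1 (g kv))
        (is_.foldl (fun d i => if P i then d.insert i (val i) else d) PySem.Dict.empty)).items
      = (is_.foldl (fun d i => if P' i then d.insert i (val' i) else d) PySem.Dict.empty).items := by
  have h1 := pvDictBuild P val is_ PySem.Dict.empty hnd (fun _ _ => rfl)
  have h2 := pvDictBuild P' val' is_ PySem.Dict.empty hnd (fun _ _ => rfl)
  have hkeys : (((is_.foldl (fun d i => if P i then d.insert i (val i) else d)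
      PySem.Dict.empty).items.map Prod.fst)).Nodup := by
    rw [h1]
    simpa [PySem.Dict.empty, Function.comp_def] using hnd.filter _
  rw [pvPhase2 g _ hkeys, h1, h2]
  simp only [PySem.Dict.empty, List.nil_append, List.map_map]
  have hfil : (is_.filter (fun i => decide (P i))) = is_.filter (fun i => decide (P' i)) :=
    List.filter_congr (fun i _ => by simp only [decide_eq_decide]; exact hP i)
  rw [hfil]
  exact List.map_congr_left (fun i _ => by simp [hval i])

theorem find_differences_in_tuples_py_eq (tl : List (List Int)) :
    find_differences_in_tuples_py tl = find_differences_in_tuples_py_alt tl := by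
  simp only [find_differences_in_tuples_py, find_differences_in_tuples_py_alt]
  rw [show ((PySem.List.pyGetD tl 0 []).length : Int) = ((PySem.List.pyGetD tl 0 []).length : Nat) from rfl,
      PySem.List.pyRange_zero_natCast]
  have hisnd : ((List.range (PySem.List.pyGetD tl 0 []).length).map (fun k : Nat => (k : Int))).Nodup :=
    List.Nodup.map (fun a b h => by exact_mod_cast h) List.nodup_range
  exact pvMain
    (fun i => (PySem.Set.ofList (tl.map (fun tpl => PySem.List.pyGetD tpl i 0))).length > 1)
    (fun i => (PySem.List.enumerate (tl.map (fun tpl => PySem.List.pyGetD tpl i 0))).map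
      (fun p => [(p.2, p.1)]))
    (fun kv => (kv.2.foldl (fun acc item => pvA_itemLoop item item acc.1 acc.2)
      ((PySem.Set.empty : PySem.Set Int), ([] : List (List (Int × Int))))).2)
    (fun i => ((PySem.List.enumerate tl).foldl (fun acc p =>
        if acc.1.contains (PySem.List.pyGetD p.2 i 0) then acc
        else (acc.1.add (PySem.List.pyGetD p.2 i 0), acc.2 ++ [[(PySem.List.pyGetD p.2 i 0, p.1)]]))
      ((PySem.Set.empty : PySem.Set Int), ([] : List (List (Int × Int))))).1.length > 1)
    (fun i => ((PySem.List.enumerate tl).foldl (fun acc p =>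
        if acc.1.contains (PySem.List.pyGetD p.2 i 0) then acc
        else (acc.1.add (PySem.List.pyGetD p.2 i 0), acc.2 ++ [[(PySem.List.pyGetD p.2 i 0, p.1)]]))
      ((PySem.Set.empty : PySem.Set Int), ([] : List (List (Int × Int))))).2)
    ((List.range (PySem.List.pyGetD tl 0 []).length).map (fun k : Nat => (k : Int)))
    hisnd
    (fun i => pvCondEq tl i)
    (fun i => congrArg Prod.snd (pvInnerEq tl i))

-- ===== VERDICT (by name: the statement is the Claim_ definition above) =====
theorem find_differences_in_tuples_py_spec : Claim_equal_find_differences_in_tuples_py := by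
  intro tl _ _
  exact find_differences_in_tuples_py_eq tl
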